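-- pv_equiv track=rewrite | github.com/smithj30/macro-dashboard | views/dynamic_dashboard.py | _group_into_rows
-- ===== SOURCE A (Python) =====
-- from typing import Any, Dict, List, Optional
--
-- def _group_into_rows(sections: List[Dict[str, Any]]) -> List[List[Dict[str, Any]]]:
--     """
--     Group sections into display rows.
--
--     Rules:
--     - card_row sections always form their own single-item full-width row.
--     - Sections with layout=="full" form their own single-item row.
--     - Consecutive non-full sections are collected into one row.
--     """
--     rows: List[List[Dict[str, Any]]] = []
--     pending: List[Dict[str, Any]] = []
--
--     for sec in sections:
--         if sec.get("type") == "card_row":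
--             if pending:
--                 rows.append(pending)
--                 pending = []
--             rows.append([sec])
--         elif sec.get("layout", "full") == "full":
--             if pending:
--                 rows.append(pending)
--                 pending = []
--             rows.append([sec])
--         else:
--             pending.append(sec)
--
--     if pending:
--         rows.append(pending)
--
--     return rows
-- ===== SOURCE B (Python) =====
-- from typing import Any, Dict, List
-- from itertools import groupby
--
-- def _is_full(sec: Dict[str, Any]) -> bool:
--     return sec.get("type") == "card_row" or sec.get("layout", "full") == "full"
--
-- def _group_into_rows(sections: List[Dict[str, Any]]) -> List[List[Dict[str, Any]]]:
--     rows: List[List[Dict[str, Any]]] = []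
--     for full, run in groupby(sections, key=_is_full):
--         if full:
--             rows.extend([sec] for sec in run)
--         else:
--             rows.append(list(run))
--     return rows
-- ===== Notes on version B (the rewrite author's own statement) =====
-- stated objective: idiomatic
-- what changed: Replaces the manual pending-accumulator state machine (flush-on-full, trailing flush) by a stateless itertools.groupby split into maximal runs of a single is_full predicate: full runs emit one singleton row per section, non-full runs become one row.
import Mathlib
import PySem

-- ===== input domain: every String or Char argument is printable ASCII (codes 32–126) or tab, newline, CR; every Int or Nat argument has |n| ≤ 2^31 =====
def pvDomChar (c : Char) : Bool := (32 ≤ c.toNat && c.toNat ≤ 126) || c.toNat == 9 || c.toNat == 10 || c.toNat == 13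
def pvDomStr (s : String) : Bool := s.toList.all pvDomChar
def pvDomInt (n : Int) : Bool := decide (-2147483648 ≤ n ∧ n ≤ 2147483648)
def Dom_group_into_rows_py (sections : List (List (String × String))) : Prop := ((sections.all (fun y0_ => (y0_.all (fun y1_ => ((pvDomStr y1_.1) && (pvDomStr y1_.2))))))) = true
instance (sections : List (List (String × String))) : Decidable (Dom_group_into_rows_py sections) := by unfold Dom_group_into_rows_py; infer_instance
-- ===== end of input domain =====

-- B replaces A's pending-accumulator state machine by a stateless split into maximal
-- runs of one is_full predicate (itertools.groupby style): same output, more idiomatic.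

-- ===== PORT A =====
-- sec.get(k) / sec.get(k, dflt) on the association-list dict
def pvSecGet? (sec : List (String × String)) (k : String) : Option String :=
  (PySem.Dict.mk sec).get? k

def pvSecGetD (sec : List (String × String)) (k dflt : String) : String :=
  (PySem.Dict.mk sec).getD k dflt

-- the body of A's `for sec in sections` loop, on the state (rows, pending)
def grStepA (st : List (List (List (String × String))) × List (List (String × String)))
    (sec : List (String × String)) :
    List (List (List (String × String))) × List (List (String × String)) :=
  if pvSecGet? sec "type" == some "card_row" then
    ((if st.2.isEmpty then st.1 else st.1 ++ [st.2]) ++ [[sec]], [])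
  else if pvSecGetD sec "layout" "full" == "full" then
    ((if st.2.isEmpty then st.1 else st.1 ++ [st.2]) ++ [[sec]], [])
  else
    (st.1, st.2 ++ [sec])

def group_into_rows_py (sections : List (List (String × String))) : List (List (List (String × String))) :=
  let st := sections.foldl grStepA ([], [])
  if st.2.isEmpty then st.1 else st.1 ++ [st.2]

-- ===== PORT B =====
def pvIsFull (sec : List (String × String)) : Bool :=
  (pvSecGet? sec "type" == some "card_row") || (pvSecGetD sec "layout" "full" == "full")

-- groupby(sections, key=pvIsFull): peel off one maximal run at a time; a full run
-- contributes one singleton row per section, a non-full run becomes one row.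
def grAltGo : List (List (String × String)) → List (List (List (String × String)))
  | [] => []
  | s :: rest =>
    if pvIsFull s then
      [s] :: grAltGo rest
    else
      (s :: rest.takeWhile (fun t => !pvIsFull t)) :: grAltGo (rest.dropWhile (fun t => !pvIsFull t))
termination_by l => l.length
decreasing_by
  · simp
  · have := List.length_dropWhile_le (fun t => !pvIsFull t) rest
    simp only [List.length_cons]
    omega

def group_into_rows_py_alt (sections : List (List (String × String))) : List (List (List (String × String))) :=
  grAltGo sections

-- ===== PRECONDITION & SPEC =====
def Spec_group_into_rows_py (sections : List (List (String × String))) (out : List (List (List (String × String)))) : Prop := out = group_into_rows_py_alt sections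
instance (sections : List (List (String × String))) (out : List (List (List (String × String)))) : Decidable (Spec_group_into_rows_py sections out) := by unfold Spec_group_into_rows_py; infer_instance

-- ===== CLAIM (what is proved, stated in full; the proofs are below) =====
def Claim_equal_group_into_rows_py : Prop := ∀ (sections : List (List (String × String))), Dom_group_into_rows_py sections → Spec_group_into_rows_py sections (group_into_rows_py sections)

-- ===== LEMMAS AND PROOFS =====

@[simp] theorem grAltGo_nil : grAltGo [] = [] := by rw [grAltGo]

theorem grAltGo_cons (s : List (String × String)) (rest : List (List (String × String))) :
    grAltGo (s :: rest) =
      if pvIsFull s then [s] :: grAltGo rest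
      else (s :: rest.takeWhile (fun t => !pvIsFull t)) ::
        grAltGo (rest.dropWhile (fun t => !pvIsFull t)) := by
  rw [grAltGo]

-- what B produces when a nonempty non-full run `pending` is still open
def grGlue (pending : List (List (String × String))) :
    List (List (String × String)) → List (List (List (String × String)))
  | [] => [pending]
  | s :: rest =>
    if pvIsFull s then pending :: grAltGo (s :: rest)
    else grGlue (pending ++ [s]) rest

theorem grGlue_eq (rest : List (List (String × String))) :
    ∀ acc, grGlue acc rest =
      (acc ++ rest.takeWhile (fun t => !pvIsFull t)) ::
        grAltGo (rest.dropWhile (fun t => !pvIsFull t)) := by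
  induction rest with
  | nil => intro acc; simp [grGlue]
  | cons t rest ih =>
    intro acc
    by_cases h : pvIsFull t
    · simp [grGlue, h]
    · simp only [Bool.not_eq_true] at h
      simp [grGlue, h, ih]

theorem grInvariant (sections : List (List (String × String))) :
    ∀ (rows : List (List (List (String × String)))) (pending : List (List (String × String))),
      (let st := sections.foldl grStepA (rows, pending);
        if st.2.isEmpty then st.1 else st.1 ++ [st.2]) =
      rows ++ (if pending.isEmpty then grAltGo sections else grGlue pending sections) := by
  induction sections with
  | nil =>
    intro rows pending
    cases pending <;> simp [grGlue]
  | cons s rest ih =>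
    intro rows pending
    by_cases hf : pvIsFull s
    · have hstep : grStepA (rows, pending) s =
          ((if pending.isEmpty then rows else rows ++ [pending]) ++ [[s]], []) := by
        unfold pvIsFull at hf
        rcases Bool.or_eq_true_iff.mp hf with h1 | h2
        · simp [grStepA, h1]
        · simp only [grStepA]
          split <;> simp
      simp only [List.foldl_cons, hstep, ih]
      cases pending <;> simp [grAltGo_cons, grGlue, hf]
    · have hstep : grStepA (rows, pending) s = (rows, pending ++ [s]) := by
        unfold pvIsFull at hf
        simp only [Bool.or_eq_true_iff, not_or] at hf
        simp [grStepA, hf.1, hf.2]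
      simp only [List.foldl_cons, hstep, ih]
      have hne : (pending ++ [s]).isEmpty = false := by simp
      cases pending with
      | nil =>
        simp only [Bool.not_eq_true] at hf
        simp [grAltGo_cons, hf, grGlue_eq]
      | cons p ps =>
        simp only [Bool.not_eq_true] at hf
        simp [grGlue, hf]

-- ===== VERDICT (by name: the statement is the Claim_ definition above) =====
theorem group_into_rows_py_spec : Claim_equal_group_into_rows_py := by
  intro sections _
  show group_into_rows_py sections = group_into_rows_py_alt sections
  have := grInvariant sections [] []
  simpa [group_into_rows_py, group_into_rows_py_alt] using this
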